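-- pv_equiv track=rewrite | github.com/springboardmentor986/AI-tool-to-analyze-legalcontracts | risk_scoring_system.py | _calculate_severity_breakdown
-- ===== SOURCE A (Python) =====
-- from typing import Dict, List
--
-- def _calculate_severity_breakdown(risks: List[Dict]) -> Dict[str, int]:
--     """Count risks by severity level"""
--     breakdown = {
--         "critical": 0,
--         "high": 0,
--         "medium": 0,
--         "low": 0
--     }
--
--     for risk in risks:
--         severity = risk.get('severity', 'Low').lower()
--         if severity in breakdown:
--             breakdown[severity] += 1
--
--     return breakdown
-- ===== SOURCE B (Python) =====
-- def _calculate_severity_breakdown(risks):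
--     """Count risks by severity level: one comprehension per fixed level."""
--     return {lvl: sum(1 for r in risks if r.get('severity', 'Low').lower() == lvl)
--             for lvl in ("critical", "high", "medium", "low")}
-- ===== Notes on version B (the rewrite author's own statement) =====
-- stated objective: idiomatic
-- what changed: Inverts the nesting: instead of one pass mutating a pre-seeded dict with a membership guard, B is a dict comprehension over the four fixed levels, each counting its matching risks with sum(); unmatched severities drop out because they equal no level.
import Mathlib
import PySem

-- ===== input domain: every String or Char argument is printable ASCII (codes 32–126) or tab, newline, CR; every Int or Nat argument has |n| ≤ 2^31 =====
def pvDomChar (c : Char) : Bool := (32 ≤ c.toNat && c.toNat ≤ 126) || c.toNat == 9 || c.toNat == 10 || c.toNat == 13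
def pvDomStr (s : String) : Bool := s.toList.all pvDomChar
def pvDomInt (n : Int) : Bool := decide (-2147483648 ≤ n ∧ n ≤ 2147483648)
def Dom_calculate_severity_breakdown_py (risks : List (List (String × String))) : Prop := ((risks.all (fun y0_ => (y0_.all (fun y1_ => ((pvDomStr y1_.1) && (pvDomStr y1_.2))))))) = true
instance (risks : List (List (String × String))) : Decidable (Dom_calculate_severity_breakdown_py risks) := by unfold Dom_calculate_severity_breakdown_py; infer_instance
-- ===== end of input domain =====

-- B replaces A's single mutating pass over a pre-seeded dict by a per-level comprehension
-- counting matching risks (idiomatic; same behaviour, including the 'Low' default and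
-- dropping of unknown severities).


-- ===== PORT A =====
-- risk.get('severity', 'Low').lower()
def pvSeverityOf (risk : List (String × String)) : String :=
  PySem.Str.lower ((PySem.Dict.mk risk).getD "severity" "Low")

-- the loop body of A: if severity in breakdown: breakdown[severity] += 1
def pvStepA (breakdown : PySem.Dict String Int) (risk : List (String × String)) : PySem.Dict String Int :=
  let severity := pvSeverityOf risk
  if breakdown.contains severity then breakdown.modify severity 0 (· + 1) else breakdown

def calculate_severity_breakdown_py (risks : List (List (String × String))) : List (String × Int) :=
  (risks.foldl pvStepA
    (PySem.Dict.mk [("critical", 0), ("high", 0), ("medium", 0), ("low", 0)])).items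

-- ===== PORT B =====
def calculate_severity_breakdown_py_alt (risks : List (List (String × String))) : List (String × Int) :=
  ["critical", "high", "medium", "low"].map
    (fun lvl => (lvl, risks.foldl (fun acc r => if pvSeverityOf r == lvl then acc + 1 else acc) (0 : Int)))

-- ===== PRECONDITION & SPEC =====
def Spec_calculate_severity_breakdown_py (risks : List (List (String × String))) (out : List (String × Int)) : Prop := out = calculate_severity_breakdown_py_alt risks
instance (risks : List (List (String × String))) (out : List (String × Int)) : Decidable (Spec_calculate_severity_breakdown_py risks out) := by unfold Spec_calculate_severity_breakdown_py; infer_instance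

-- ===== CLAIM (what is proved, stated in full; the proofs are below) =====
def Claim_equal_calculate_severity_breakdown_py : Prop := ∀ (risks : List (List (String × String))), Dom_calculate_severity_breakdown_py risks → Spec_calculate_severity_breakdown_py risks (calculate_severity_breakdown_py risks)

-- ===== LEMMAS AND PROOFS =====

-- one step of A's loop on the four-key dict, per case of the severity
lemma pv_step_crit (r : List (String × String)) (h : pvSeverityOf r = "critical") (a b c d : Int) :
    pvStepA (PySem.Dict.mk [("critical", a), ("high", b), ("medium", c), ("low", d)]) r =
    PySem.Dict.mk [("critical", a + 1), ("high", b), ("medium", c), ("low", d)] := by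
  simp [pvStepA, h, PySem.Dict.contains, PySem.Dict.modify, PySem.Dict.getD,
        PySem.Dict.get?, PySem.Dict.insert]

lemma pv_step_high (r : List (String × String)) (h : pvSeverityOf r = "high") (a b c d : Int) :
    pvStepA (PySem.Dict.mk [("critical", a), ("high", b), ("medium", c), ("low", d)]) r =
    PySem.Dict.mk [("critical", a), ("high", b + 1), ("medium", c), ("low", d)] := by
  simp [pvStepA, h, PySem.Dict.contains, PySem.Dict.modify, PySem.Dict.getD,
        PySem.Dict.get?, PySem.Dict.insert]

lemma pv_step_med (r : List (String × String)) (h : pvSeverityOf r = "medium") (a b c d : Int) :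
    pvStepA (PySem.Dict.mk [("critical", a), ("high", b), ("medium", c), ("low", d)]) r =
    PySem.Dict.mk [("critical", a), ("high", b), ("medium", c + 1), ("low", d)] := by
  simp [pvStepA, h, PySem.Dict.contains, PySem.Dict.modify, PySem.Dict.getD,
        PySem.Dict.get?, PySem.Dict.insert]

lemma pv_step_low (r : List (String × String)) (h : pvSeverityOf r = "low") (a b c d : Int) :
    pvStepA (PySem.Dict.mk [("critical", a), ("high", b), ("medium", c), ("low", d)]) r =
    PySem.Dict.mk [("critical", a), ("high", b), ("medium", c), ("low", d + 1)] := by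
  simp [pvStepA, h, PySem.Dict.contains, PySem.Dict.modify, PySem.Dict.getD,
        PySem.Dict.get?, PySem.Dict.insert]

lemma pv_step_other (r : List (String × String))
    (h1 : pvSeverityOf r ≠ "critical") (h2 : pvSeverityOf r ≠ "high")
    (h3 : pvSeverityOf r ≠ "medium") (h4 : pvSeverityOf r ≠ "low") (a b c d : Int) :
    pvStepA (PySem.Dict.mk [("critical", a), ("high", b), ("medium", c), ("low", d)]) r =
    PySem.Dict.mk [("critical", a), ("high", b), ("medium", c), ("low", d)] := by
  simp [pvStepA, PySem.Dict.contains, beq_iff_eq,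
        Ne.symm h1, Ne.symm h2, Ne.symm h3, Ne.symm h4]

-- A's loop preserves the four-key dict shape, adding each risk's severity count.
lemma pv_foldA_inv (risks : List (List (String × String))) :
    ∀ (a b c d : Int),
      risks.foldl pvStepA
        (PySem.Dict.mk [("critical", a), ("high", b), ("medium", c), ("low", d)]) =
      PySem.Dict.mk
        [("critical", a + (risks.countP (fun r => pvSeverityOf r == "critical") : Int)),
         ("high",     b + (risks.countP (fun r => pvSeverityOf r == "high") : Int)),
         ("medium",   c + (risks.countP (fun r => pvSeverityOf r == "medium") : Int)),
         ("low",      d + (risks.countP (fun r => pvSeverityOf r == "low") : Int))] := by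
  induction risks with
  | nil => intro a b c d; simp
  | cons r rs ih =>
    intro a b c d
    rw [List.foldl_cons]
    by_cases h1 : pvSeverityOf r = "critical"
    · rw [pv_step_crit r h1, ih]
      simp [h1]
      ring
    · by_cases h2 : pvSeverityOf r = "high"
      · rw [pv_step_high r h2, ih]
        simp [h2]
        ring
      · by_cases h3 : pvSeverityOf r = "medium"
        · rw [pv_step_med r h3, ih]
          simp [h3]
          ring
        · by_cases h4 : pvSeverityOf r = "low"
          · rw [pv_step_low r h4, ih]
            simp [h4]
            ring
          · rw [pv_step_other r h1 h2 h3 h4, ih]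
            simp [h1, h2, h3, h4]

-- ===== VERDICT (by name: the statement is the Claim_ definition above) =====
theorem calculate_severity_breakdown_py_spec : Claim_equal_calculate_severity_breakdown_py := by
  intro risks _
  unfold Spec_calculate_severity_breakdown_py calculate_severity_breakdown_py calculate_severity_breakdown_py_alt
  rw [pv_foldA_inv risks 0 0 0 0]
  simp [List.map, PySem.List.foldl_ite_add_one]
  refine ⟨?_, ?_, ?_, ?_⟩ <;> exact List.countP_congr (fun r _ => by simp)
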